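-- pv_equiv track=rewrite | github.com/snapfast/computer | algorithms/02-graph-algorithms/depth-first-search-recursive.py | depth_first_search_recursion
-- ===== SOURCE A (Python) =====
-- def depth_first_search_recursion(graph, start_point, visited_nodes):
--     if start_point not in visited_nodes:
--         visited_nodes.append(start_point)
--
--         if start_point not in graph:
--             return visited_nodes
--
--         # recursion
--         for neighbour in graph[start_point]:
--             depth_first_search_recursion(graph, neighbour, visited_nodes)
--     return visited_nodes
-- ===== SOURCE B (Python) =====
-- def depth_first_search_recursion(graph, start_point, visited_nodes):
--     stack = [start_point]
--     while stack:
--         node = stack.pop()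
--         if node not in visited_nodes:
--             visited_nodes.append(node)
--             if node in graph:
--                 stack.extend(reversed(graph[node]))
--     return visited_nodes
-- ===== Notes on version B (the rewrite author's own statement) =====
-- stated objective: alternative
-- what changed: Replaced the recursive DFS (function recursion over neighbours) by an iterative DFS with an explicit stack: pop a node, check visited on pop, push the node's neighbours reversed; same visitation order, no recursion.
import Mathlib
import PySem

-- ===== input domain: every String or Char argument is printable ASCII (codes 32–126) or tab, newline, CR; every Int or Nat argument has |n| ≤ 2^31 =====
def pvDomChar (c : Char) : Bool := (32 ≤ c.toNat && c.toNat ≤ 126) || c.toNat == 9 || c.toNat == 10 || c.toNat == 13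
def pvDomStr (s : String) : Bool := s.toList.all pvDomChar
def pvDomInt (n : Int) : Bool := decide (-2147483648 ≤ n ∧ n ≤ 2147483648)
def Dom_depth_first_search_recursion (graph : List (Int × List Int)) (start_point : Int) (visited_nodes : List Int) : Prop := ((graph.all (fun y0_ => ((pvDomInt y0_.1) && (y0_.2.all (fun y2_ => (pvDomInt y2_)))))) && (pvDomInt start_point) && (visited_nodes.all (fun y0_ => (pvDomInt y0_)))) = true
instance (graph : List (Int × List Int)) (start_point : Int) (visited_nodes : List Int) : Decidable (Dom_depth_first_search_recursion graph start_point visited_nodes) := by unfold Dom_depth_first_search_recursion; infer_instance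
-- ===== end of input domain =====

-- B replaces A's recursion by an iterative explicit-stack DFS (same visitation order); objective: alternative decomposition.
-- Both Pythons mutate visited_nodes in place identically (append new nodes in visit order) and return it; the theorems are about the returned value.

-- ===== PORT A =====
-- Fuel guard only (the recursion depth is bounded by graph.length + 1, proved below); each
-- recursive Python call becomes one dfsA call, the for-loop over neighbours is the foldl.
def dfsA (graph : List (Int × List Int)) : Nat → Int → List Int → List Int
  | 0, _, visited => visited
  | fuel+1, s, visited =>
    if s ∈ visited then visited
    else
      -- visited_nodes.append(start_point)
      match List.lookup s graph with   -- 'if start_point not in graph: return'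
      | none => visited ++ [s]
      | some nbs => nbs.foldl (fun acc n => dfsA graph fuel n acc) (visited ++ [s])

def depth_first_search_recursion (graph : List (Int × List Int)) (start_point : Int) (visited_nodes : List Int) : List Int :=
  dfsA graph (graph.length + 1) start_point visited_nodes

-- ===== PORT B =====
-- proof-only weight bookkeeping, used here only to pick a provably sufficient fuel for the while-loop guard
def pvKeys (graph : List (Int × List Int)) : List Int := (graph.map Prod.fst).dedup
def pvS (graph : List (Int × List Int)) (w : Int → Nat) (v : List Int) : Nat :=
  (((pvKeys graph).filter (fun k => decide (k ∉ v))).map w).sum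
def pvW (graph : List (Int × List Int)) : Int → Nat := fun k => ((List.lookup k graph).getD []).length

-- Python: stack with top at the end, stack.extend(reversed(graph[node])); modelled with top at the
-- head, so pushing reversed(nbs) onto the tail-top stack is exactly 'nbs ++ rest' on the head-top stack.
-- Fuel guard only: the while loop runs at most pvS graph (pvW graph) [] + 1 iterations (proved below).
def loopB (graph : List (Int × List Int)) : Nat → List Int → List Int → List Int
  | 0, _, visited => visited
  | fuel+1, stack, visited =>
    match stack with
    | [] => visited
    | n :: rest =>
      if n ∈ visited then loopB graph fuel rest visited
      else
        match List.lookup n graph with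
        | none => loopB graph fuel rest (visited ++ [n])
        | some nbs => loopB graph fuel (nbs ++ rest) (visited ++ [n])

def depth_first_search_recursion_alt (graph : List (Int × List Int)) (start_point : Int) (visited_nodes : List Int) : List Int :=
  loopB graph (pvS graph (pvW graph) [] + 1) [start_point] visited_nodes

-- ===== PRECONDITION & SPEC =====
def Spec_depth_first_search_recursion (graph : List (Int × List Int)) (start_point : Int) (visited_nodes : List Int) (out : List Int) : Prop := out = depth_first_search_recursion_alt graph start_point visited_nodes
instance (graph : List (Int × List Int)) (start_point : Int) (visited_nodes : List Int) (out : List Int) : Decidable (Spec_depth_first_search_recursion graph start_point visited_nodes out) := by unfold Spec_depth_first_search_recursion; infer_instance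

-- ===== CLAIM (what is proved, stated in full; the proofs are below) =====
def Claim_equal_depth_first_search_recursion : Prop := ∀ (graph : List (Int × List Int)) (start_point : Int) (visited_nodes : List Int), Dom_depth_first_search_recursion graph start_point visited_nodes → Spec_depth_first_search_recursion graph start_point visited_nodes (depth_first_search_recursion graph start_point visited_nodes)

-- ===== LEMMAS AND PROOFS =====
-- number of unvisited keys (weight 1 each)
def pvM (graph : List (Int × List Int)) (v : List Int) : Nat := pvS graph (fun _ => 1) v

-- equation lemmas for the two ports
theorem dfsA_mem (graph : List (Int × List Int)) (f : Nat) {s : Int} {v : List Int}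
    (h : s ∈ v) : dfsA graph (f+1) s v = v := by rw [dfsA, if_pos h]

theorem dfsA_none (graph : List (Int × List Int)) (f : Nat) {s : Int} {v : List Int}
    (h : s ∉ v) (hl : List.lookup s graph = none) : dfsA graph (f+1) s v = v ++ [s] := by
  rw [dfsA, if_neg h, hl]

theorem dfsA_some (graph : List (Int × List Int)) (f : Nat) {s : Int} {v : List Int} {nbs : List Int}
    (h : s ∉ v) (hl : List.lookup s graph = some nbs) :
    dfsA graph (f+1) s v = nbs.foldl (fun acc n => dfsA graph f n acc) (v ++ [s]) := by
  rw [dfsA, if_neg h, hl]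

theorem loopB_nil (graph : List (Int × List Int)) (f : Nat) (v : List Int) :
    loopB graph (f+1) [] v = v := by rw [loopB]

theorem loopB_mem (graph : List (Int × List Int)) (f : Nat) {n : Int} (rest : List Int) {v : List Int}
    (h : n ∈ v) : loopB graph (f+1) (n :: rest) v = loopB graph f rest v := by
  rw [loopB]; simp only [if_pos h]

theorem loopB_none (graph : List (Int × List Int)) (f : Nat) {n : Int} (rest : List Int) {v : List Int}
    (h : n ∉ v) (hl : List.lookup n graph = none) :
    loopB graph (f+1) (n :: rest) v = loopB graph f rest (v ++ [n]) := by
  rw [loopB]; simp only [if_neg h, hl]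

theorem loopB_some (graph : List (Int × List Int)) (f : Nat) {n : Int} (rest : List Int) {v : List Int}
    {nbs : List Int} (h : n ∉ v) (hl : List.lookup n graph = some nbs) :
    loopB graph (f+1) (n :: rest) v = loopB graph f (nbs ++ rest) (v ++ [n]) := by
  rw [loopB]; simp only [if_neg h, hl]

theorem pv_lookup_mem_keys {graph : List (Int × List Int)} {s : Int} {nbs : List Int}
    (h : List.lookup s graph = some nbs) : s ∈ pvKeys graph := by
  rw [pvKeys, List.mem_dedup]
  induction graph with
  | nil => simp [List.lookup] at h
  | cons p g ih =>
    rw [List.lookup] at h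
    by_cases hp : s == p.1
    · rw [List.map_cons]
      exact List.mem_cons.mpr (Or.inl (beq_iff_eq.mp hp))
    · rw [Bool.not_eq_true] at hp
      rw [hp] at h
      exact List.mem_cons.mpr (Or.inr (ih h))

theorem pvS_anti (graph : List (Int × List Int)) (w : Int → Nat) {v v' : List Int}
    (h : ∀ k, k ∈ v → k ∈ v') : pvS graph w v' ≤ pvS graph w v := by
  unfold pvS
  have hsub : List.Sublist ((pvKeys graph).filter (fun k => decide (k ∉ v')))
      ((pvKeys graph).filter (fun k => decide (k ∉ v))) := by
    apply List.monotone_filter_right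
    intro a ha
    simp only [decide_eq_true_eq] at *
    exact fun hav => ha (h a hav)
  exact List.Sublist.sum_le_sum (hsub.map w) (by intro x _; exact Nat.zero_le x)

theorem pv_filt_key (w : Int → Nat) (n : Int) (v : List Int) (hv : n ∉ v) :
    ∀ (l : List Int), l.Nodup → n ∈ l →
      ((l.filter (fun k => decide (k ∉ v))).map w).sum
        = ((l.filter (fun k => decide (k ∉ v ++ [n]))).map w).sum + w n := by
  intro l
  induction l with
  | nil => intro _ h; simp at h
  | cons x l ih =>
    intro hnd hm
    have hndl : l.Nodup := (List.nodup_cons.mp hnd).2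
    by_cases hx : x = n
    · subst hx
      have hxl : x ∉ l := (List.nodup_cons.mp hnd).1
      have hfilt : l.filter (fun k => decide (k ∉ v ++ [x])) = l.filter (fun k => decide (k ∉ v)) := by
        apply List.filter_congr
        intro k hk
        have hkx : k ≠ x := fun he => hxl (he ▸ hk)
        simp [List.mem_append, hkx]
      rw [List.filter_cons_of_pos (by simpa using hv),
          List.filter_cons_of_neg (by show ¬ decide (x ∉ v ++ [x]) = true; simp), hfilt,
          List.map_cons, List.sum_cons]
      omega
    · have hml : n ∈ l := by
        rcases List.mem_cons.mp hm with h | h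
        · exact absurd h.symm hx
        · exact h
      by_cases hxv : x ∈ v
      · rw [List.filter_cons_of_neg (by simpa using hxv),
            List.filter_cons_of_neg (by show ¬ decide (x ∉ v ++ [n]) = true; simp [hxv])]
        exact ih hndl hml
      · rw [List.filter_cons_of_pos (by simpa using hxv),
            List.filter_cons_of_pos (by show decide (x ∉ v ++ [n]) = true; simp [hxv, hx]),
            List.map_cons, List.sum_cons, List.map_cons, List.sum_cons, ih hndl hml]
        omega

theorem pvS_key (graph : List (Int × List Int)) (w : Int → Nat) {n : Int} {v : List Int}
    (hk : n ∈ pvKeys graph) (hv : n ∉ v) :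
    pvS graph w v = pvS graph w (v ++ [n]) + w n :=
  pv_filt_key w n v hv (pvKeys graph) (List.nodup_dedup _) hk

theorem pvM_key_lt (graph : List (Int × List Int)) {n : Int} {v : List Int}
    (hk : n ∈ pvKeys graph) (hv : n ∉ v) : pvM graph (v ++ [n]) < pvM graph v := by
  have h1 := pvS_key graph (fun _ => 1) hk hv
  have h2 : (fun (_ : Int) => (1:Nat)) n = 1 := rfl
  rw [h2] at h1
  unfold pvM
  omega

theorem pvM_le_len (graph : List (Int × List Int)) (v : List Int) : pvM graph v ≤ graph.length := by
  unfold pvM pvS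
  have h1 : ∀ l : List Int, ((l.map (fun _ => (1:Nat))).sum = l.length) := by
    intro l; induction l with
    | nil => rfl
    | cons x l ih => simp only [List.map_cons, List.sum_cons, ih, List.length_cons]; omega
  rw [h1]
  calc ((pvKeys graph).filter _).length ≤ (pvKeys graph).length := List.length_filter_le _ _
    _ ≤ (graph.map Prod.fst).length := (List.dedup_sublist _).length_le
    _ = graph.length := List.length_map ..

-- dfsA only appends to visited
theorem dfsA_foldl_ext (graph : List (Int × List Int)) (f : Nat)
    (H : ∀ s v, ∃ w, dfsA graph f s v = v ++ w) :
    ∀ (nb : List Int) (v : List Int), ∃ w, nb.foldl (fun acc n => dfsA graph f n acc) v = v ++ w := by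
  intro nb
  induction nb with
  | nil => intro v; exact ⟨[], by simp⟩
  | cons n nb ih =>
    intro v
    obtain ⟨w1, hw1⟩ := H n v
    obtain ⟨w2, hw2⟩ := ih (dfsA graph f n v)
    exact ⟨w1 ++ w2, by rw [List.foldl_cons, hw2, hw1, List.append_assoc]⟩

theorem dfsA_ext (graph : List (Int × List Int)) :
    ∀ (f : Nat) (s : Int) (v : List Int), ∃ w, dfsA graph f s v = v ++ w := by
  intro f
  induction f with
  | zero => intro s v; exact ⟨[], by simp [dfsA]⟩
  | succ f ih =>
    intro s v
    by_cases h : s ∈ v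
    · exact ⟨[], by rw [dfsA_mem graph f h]; simp⟩
    · cases hl : List.lookup s graph with
      | none => exact ⟨[s], dfsA_none graph f h hl⟩
      | some nbs =>
        obtain ⟨w, hw⟩ := dfsA_foldl_ext graph f ih nbs (v ++ [s])
        refine ⟨[s] ++ w, ?_⟩
        rw [dfsA_some graph f h hl, hw, List.append_assoc]

theorem pvM_ext_le (graph : List (Int × List Int)) {v : List Int} (w : List Int) :
    pvM graph (v ++ w) ≤ pvM graph v :=
  pvS_anti graph _ (fun k hk => List.mem_append_left _ hk)

-- fuel irrelevance for A's port
theorem dfsA_fuel (graph : List (Int × List Int)) :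
    ∀ (k : Nat) (v : List Int) (s : Int) (f f' : Nat),
      pvM graph v ≤ k → pvM graph v < f → pvM graph v < f' →
      dfsA graph f s v = dfsA graph f' s v := by
  intro k
  induction k with
  | zero =>
    intro v s f f' hk hf hf'
    obtain ⟨f1, rfl⟩ := Nat.exists_eq_succ_of_ne_zero (Nat.pos_iff_ne_zero.mp (Nat.lt_of_le_of_lt (Nat.zero_le _) hf))
    obtain ⟨f2, rfl⟩ := Nat.exists_eq_succ_of_ne_zero (Nat.pos_iff_ne_zero.mp (Nat.lt_of_le_of_lt (Nat.zero_le _) hf'))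
    by_cases h : s ∈ v
    · rw [dfsA_mem graph f1 h, dfsA_mem graph f2 h]
    · cases hl : List.lookup s graph with
      | none => rw [dfsA_none graph f1 h hl, dfsA_none graph f2 h hl]
      | some nbs =>
        exfalso
        have := pvM_key_lt graph (pv_lookup_mem_keys hl) h
        omega
  | succ k ih =>
    intro v s f f' hk hf hf'
    obtain ⟨f1, rfl⟩ := Nat.exists_eq_succ_of_ne_zero (Nat.pos_iff_ne_zero.mp (Nat.lt_of_le_of_lt (Nat.zero_le _) hf))
    obtain ⟨f2, rfl⟩ := Nat.exists_eq_succ_of_ne_zero (Nat.pos_iff_ne_zero.mp (Nat.lt_of_le_of_lt (Nat.zero_le _) hf'))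
    by_cases h : s ∈ v
    · rw [dfsA_mem graph f1 h, dfsA_mem graph f2 h]
    · cases hl : List.lookup s graph with
      | none => rw [dfsA_none graph f1 h hl, dfsA_none graph f2 h hl]
      | some nbs =>
        have hlt := pvM_key_lt graph (pv_lookup_mem_keys hl) h
        rw [dfsA_some graph f1 h hl, dfsA_some graph f2 h hl]
        -- fold congruence at the two fuels
        have main : ∀ (nb : List Int) (u : List Int), pvM graph u ≤ k → pvM graph u < f1 → pvM graph u < f2 →
            nb.foldl (fun acc n => dfsA graph f1 n acc) u = nb.foldl (fun acc n => dfsA graph f2 n acc) u := by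
          intro nb
          induction nb with
          | nil => intro u _ _ _; rfl
          | cons n nb ihn =>
            intro u hu hu1 hu2
            have hstep : dfsA graph f1 n u = dfsA graph f2 n u := ih u n f1 f2 hu hu1 hu2
            obtain ⟨w, hw⟩ := dfsA_ext graph f1 n u
            have hle : pvM graph (dfsA graph f1 n u) ≤ pvM graph u := by
              rw [hw]; exact pvM_ext_le graph w
            rw [List.foldl_cons, List.foldl_cons, ← hstep]
            exact ihn (dfsA graph f1 n u) (Nat.le_trans hle hu) (Nat.lt_of_le_of_lt hle hu1) (Nat.lt_of_le_of_lt hle hu2)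
        exact main nbs (v ++ [s]) (by omega) (by omega) (by omega)

-- the canonical fully-fuelled run, used to connect the two ports
def dfsBigFold (graph : List (Int × List Int)) (stack : List Int) (v : List Int) : List Int :=
  stack.foldl (fun acc n => dfsA graph (pvM graph acc + 1) n acc) v

theorem foldl_big (graph : List (Int × List Int)) (f : Nat) :
    ∀ (nbs : List Int) (u : List Int), pvM graph u < f →
      nbs.foldl (fun acc n => dfsA graph f n acc) u = dfsBigFold graph nbs u := by
  intro nbs
  induction nbs with
  | nil => intro u _; rfl
  | cons n nbs ihn =>
    intro u hu
    have hstep : dfsA graph f n u = dfsA graph (pvM graph u + 1) n u :=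
      dfsA_fuel graph (pvM graph u) u n f (pvM graph u + 1) (Nat.le_refl _) hu (Nat.lt_succ_self _)
    obtain ⟨w, hw⟩ := dfsA_ext graph f n u
    have hle : pvM graph (dfsA graph f n u) ≤ pvM graph u := by
      rw [hw]; exact pvM_ext_le graph w
    rw [dfsBigFold, List.foldl_cons, List.foldl_cons]
    rw [show dfsA graph (pvM graph u + 1) n u = dfsA graph f n u from hstep.symm]
    exact ihn (dfsA graph f n u) (Nat.lt_of_le_of_lt hle hu)

theorem pv_bridge (graph : List (Int × List Int)) :
    ∀ (F : Nat) (stack : List Int) (v : List Int),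
      stack.length + pvS graph (pvW graph) v ≤ F →
      loopB graph F stack v = dfsBigFold graph stack v := by
  intro F
  induction F with
  | zero =>
    intro stack v h
    have hnil : stack = [] := List.length_eq_zero_iff.mp (by omega)
    subst hnil; rfl
  | succ F ih =>
    intro stack v h
    cases stack with
    | nil => rw [loopB_nil]; rfl
    | cons n rest =>
      rw [dfsBigFold, List.foldl_cons]
      rw [List.length_cons] at h
      by_cases hm : n ∈ v
      · rw [loopB_mem graph F rest hm, dfsA_mem graph (pvM graph v) hm,
            ih rest v (by omega)]
        rfl
      · cases hl : List.lookup n graph with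
        | none =>
          have hS : pvS graph (pvW graph) (v ++ [n]) ≤ pvS graph (pvW graph) v :=
            pvS_anti graph _ (fun k hk => List.mem_append_left _ hk)
          rw [loopB_none graph F rest hm hl, dfsA_none graph (pvM graph v) hm hl,
              ih rest (v ++ [n]) (by omega)]
          rfl
        | some nbs =>
          have hkey := pv_lookup_mem_keys hl
          have hMlt := pvM_key_lt graph hkey hm
          have hWn : pvW graph n = nbs.length := by simp [pvW, hl]
          have hSkey : pvS graph (pvW graph) v = pvS graph (pvW graph) (v ++ [n]) + nbs.length := by
            rw [pvS_key graph (pvW graph) hkey hm, hWn]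
          have hIH : loopB graph F (nbs ++ rest) (v ++ [n]) = dfsBigFold graph (nbs ++ rest) (v ++ [n]) := by
            apply ih
            rw [List.length_append]
            omega
          rw [loopB_some graph F rest hm hl, hIH,
              dfsA_some graph (pvM graph v) hm hl,
              foldl_big graph (pvM graph v) nbs (v ++ [n]) hMlt]
          simp only [dfsBigFold, List.foldl_append]

-- ===== VERDICT (by name: the statement is the Claim_ definition above) =====
theorem depth_first_search_recursion_spec : Claim_equal_depth_first_search_recursion := by
  intro graph s v _
  unfold Spec_depth_first_search_recursion depth_first_search_recursion depth_first_search_recursion_alt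
  have h1 : dfsA graph (graph.length + 1) s v = dfsA graph (pvM graph v + 1) s v :=
    dfsA_fuel graph (pvM graph v) v s _ _ (Nat.le_refl _)
      (Nat.lt_succ_of_le (pvM_le_len graph v)) (Nat.lt_succ_self _)
  have h2 : dfsA graph (pvM graph v + 1) s v = dfsBigFold graph [s] v := by
    rw [dfsBigFold, List.foldl_cons, List.foldl_nil]
  have h3 : loopB graph (pvS graph (pvW graph) [] + 1) [s] v = dfsBigFold graph [s] v := by
    apply pv_bridge
    have hle : pvS graph (pvW graph) v ≤ pvS graph (pvW graph) [] :=
      pvS_anti graph _ (fun k hk => absurd hk (List.not_mem_nil))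
    rw [List.length_cons, List.length_nil]
    omega
  rw [h3, ← h2, ← h1]
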